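-- pv_equiv track=rewrite | github.com/kayjan/bigtree | bigtree/tree/export/_stdout.py | horizontal_join
-- ===== SOURCE A (Python) =====
-- from typing import List, Optional, TypeVar, Union
--
-- def horizontal_join(node_displays: List[List[str]], spacing: int = 0) -> List[str]:
--     """Horizontally join multiple node displays, for displaying tree vertically.
--
--     Args:
--         node_displays: multiple node displays belonging to the same row
--         spacing: spacing between node displays
--
--     Returns:
--         Node display of the row
--     """
--     space = " "
--     height = max([len(node_display) for node_display in node_displays])
--     row_display = {idx: "" for idx in range(height)}
--     for node_display_idx, node_display in enumerate(node_displays):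
--         width = len(node_display[0])
--
--         # Add node content
--         for row_idx, node_display_row in enumerate(node_display):
--             if node_display_idx:
--                 row_display[row_idx] += spacing * space
--             row_display[row_idx] += node_display_row
--
--         # Add node buffer
--         for row_idx_buffer in range(len(node_display), height):
--             if node_display_idx:
--                 row_display[row_idx_buffer] += spacing * space
--             row_display[row_idx_buffer] += width * space
--     return [row_display[k] for k in sorted(row_display)]
-- ===== SOURCE B (Python) =====
-- def horizontal_join(node_displays, spacing=0):
--     """Horizontally join multiple node displays, row-major: one join per row."""
--     space = " "
--     height = max(len(node_display) for node_display in node_displays)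
--     sep = spacing * space
--     rows = []
--     for row_idx in range(height):
--         pieces = [
--             node_display[row_idx]
--             if row_idx < len(node_display)
--             else len(node_display[0]) * space
--             for node_display in node_displays
--         ]
--         rows.append(sep.join(pieces))
--     return rows
-- ===== Notes on version B (the rewrite author's own statement) =====
-- stated objective: faster
-- what changed: B interchanges the loop nesting: instead of A's dict of rows incrementally extended with '+=' per block (repeated string concatenation), B computes height first and builds the output row-major, joining one list of per-block pieces per row with (spacing*' ').join.
import Mathlib
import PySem

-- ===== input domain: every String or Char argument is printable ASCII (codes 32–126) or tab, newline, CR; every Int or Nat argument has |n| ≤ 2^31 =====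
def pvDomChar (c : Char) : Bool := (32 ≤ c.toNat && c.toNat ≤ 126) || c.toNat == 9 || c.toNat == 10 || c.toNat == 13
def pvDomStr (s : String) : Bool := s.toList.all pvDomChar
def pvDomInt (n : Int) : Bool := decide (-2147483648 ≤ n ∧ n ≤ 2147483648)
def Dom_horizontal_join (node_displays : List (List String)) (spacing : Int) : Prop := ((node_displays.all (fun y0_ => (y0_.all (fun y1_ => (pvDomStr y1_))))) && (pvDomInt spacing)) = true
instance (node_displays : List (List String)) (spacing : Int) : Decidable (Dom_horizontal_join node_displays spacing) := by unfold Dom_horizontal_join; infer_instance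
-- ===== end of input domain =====

-- B replaces A's dict-of-rows with incremental '+=' accumulation by a row-major build: height
-- first, then one (spacing*' ').join of per-block pieces per row (avoids repeated concatenation).

-- Python's `n * s` for a string s (n ≤ 0 gives ""); exact.
def pvRep (n : Int) (s : String) : String :=
  String.ofList (List.flatten (List.replicate n.toNat s.toList))

-- ===== PORT A =====
def horizontal_join (node_displays : List (List String)) (spacing : Int) : List String :=
  let space := " "
  -- max([...]) raises ValueError on empty node_displays; excluded by Pre_, the .getD 0 is unreachable there
  let height : Int := (PySem.List.max? (node_displays.map (fun nd => PySem.List.len nd)) (fun x => x)).getD 0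
  let row0 : PySem.Dict Int String :=
    (PySem.List.pyRange 0 height 1).foldl (fun d idx => d.insert idx "") PySem.Dict.empty
  let rowD : PySem.Dict Int String :=
    (PySem.List.enumerate node_displays 0).foldl (fun d p =>
      -- len(node_display[0]) raises IndexError on an empty block; excluded by Pre_, the .getD "" is unreachable there
      let width : Int := PySem.Str.len ((PySem.List.pyGet? p.2 0).getD "")
      let d1 := (PySem.List.enumerate p.2 0).foldl (fun d q =>
        (if p.1 ≠ 0 then d.modify q.1 "" (fun s => s ++ pvRep spacing space) else d).modify q.1 ""
          (fun s => s ++ q.2)) d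
      (PySem.List.pyRange (PySem.List.len p.2) height 1).foldl (fun d rb =>
        (if p.1 ≠ 0 then d.modify rb "" (fun s => s ++ pvRep spacing space) else d).modify rb ""
          (fun s => s ++ pvRep width space)) d1) row0
  (PySem.List.sorted rowD.keys (fun k => k)).map (fun k => rowD.getD k "")

-- ===== PORT B =====
def horizontal_join_alt (node_displays : List (List String)) (spacing : Int) : List String :=
  let space := " "
  -- max(...) raises ValueError on empty node_displays; excluded by Pre_
  let height : Int := (PySem.List.max? (node_displays.map (fun nd => PySem.List.len nd)) (fun x => x)).getD 0
  let sep := pvRep spacing space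
  (PySem.List.pyRange 0 height 1).map (fun row_idx =>
    PySem.Str.join sep (node_displays.map (fun nd =>
      if row_idx < PySem.List.len nd then (PySem.List.pyGet? nd row_idx).getD ""
      else pvRep (PySem.Str.len ((PySem.List.pyGet? nd 0).getD "")) space)))

-- ===== PRECONDITION & SPEC =====
-- Pre_ excludes exactly the inputs where Python A raises: empty node_displays (ValueError from
-- max) and any empty block, reached by A's width = len(node_display[0]) (IndexError).
def Pre_horizontal_join (node_displays : List (List String)) (spacing : Int) : Prop :=
  node_displays ≠ [] ∧ ∀ nd ∈ node_displays, nd ≠ []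
instance (node_displays : List (List String)) (spacing : Int) : Decidable (Pre_horizontal_join node_displays spacing) := by unfold Pre_horizontal_join; infer_instance
def pvWitness_horizontal_join : List (List String) × Int := ([["ab"], ["c", "dd"]], 1)

def Spec_horizontal_join (node_displays : List (List String)) (spacing : Int) (out : List String) : Prop := out = horizontal_join_alt node_displays spacing
instance (node_displays : List (List String)) (spacing : Int) (out : List String) : Decidable (Spec_horizontal_join node_displays spacing out) := by unfold Spec_horizontal_join; infer_instance

-- ===== CLAIM (what is proved, stated in full; the proofs are below) =====
def Claim_equal_horizontal_join : Prop := ∀ (node_displays : List (List String)) (spacing : Int), Dom_horizontal_join node_displays spacing → Pre_horizontal_join node_displays spacing → Spec_horizontal_join node_displays spacing (horizontal_join node_displays spacing)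

-- ===== LEMMAS AND PROOFS =====

-- the piece block `nd` contributes to row `r` (the shared shape of both ports' row pieces)
def hjPiece (spacing : Int) (nd : List String) (r : Int) : String :=
  if r < PySem.List.len nd then (PySem.List.pyGet? nd r).getD ""
  else pvRep (PySem.Str.len ((PySem.List.pyGet? nd 0).getD "")) " "

def hjStep (i : Int) (sep : String) (d : PySem.Dict Int String) (q : Int × String) : PySem.Dict Int String :=
  (if i ≠ 0 then d.modify q.1 "" (fun s => s ++ sep) else d).modify q.1 "" (fun s => s ++ q.2)

theorem getD_hjStep (i : Int) (sep : String) (d : PySem.Dict Int String) (q : Int × String) (r : Int) :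
    (hjStep i sep d q).getD r "" =
      if r = q.1 then (if i ≠ 0 then d.getD r "" ++ sep else d.getD r "") ++ q.2 else d.getD r "" := by
  unfold hjStep
  split_ifs with h1 h2 h2 <;> simp [PySem.Dict.getD_modify, h2]

theorem keys_hjStep (i : Int) (sep : String) (d : PySem.Dict Int String) (q : Int × String)
    (hq : q.1 ∈ d.keys) : (hjStep i sep d q).keys = d.keys := by
  unfold hjStep
  have hc : d.contains q.1 = true := by
    rw [PySem.Dict.contains_iff_mem_keys]; exact hq
  split_ifs with h1
  · rw [PySem.Dict.keys_modify, PySem.Dict.keys_insert_of_contains,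
      PySem.Dict.keys_modify, PySem.Dict.keys_insert_of_contains] <;>
      simp [PySem.Dict.contains_modify, hc]
  · rw [PySem.Dict.keys_modify, PySem.Dict.keys_insert_of_contains _ _ hc]

theorem keys_hjFold (i : Int) (sep : String) (L : List (Int × String)) : ∀ (d : PySem.Dict Int String),
    (∀ q ∈ L, q.1 ∈ d.keys) → (L.foldl (hjStep i sep) d).keys = d.keys := by
  induction L with
  | nil => intro d _; rfl
  | cons q L ih =>
    intro d hL
    have hq : q.1 ∈ d.keys := hL q (by simp)
    have hk := keys_hjStep i sep d q hq
    simp only [List.foldl_cons]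
    rw [ih (hjStep i sep d q) (fun p hp => by rw [hk]; exact hL p (by simp [hp])), hk]

theorem getD_hjFold_notmem (i : Int) (sep : String) (L : List (Int × String)) : ∀ (d : PySem.Dict Int String)
    (r : Int), r ∉ L.map Prod.fst → (L.foldl (hjStep i sep) d).getD r "" = d.getD r "" := by
  induction L with
  | nil => intro d r _; rfl
  | cons q L ih =>
    intro d r hr
    simp only [List.map_cons, List.mem_cons, not_or] at hr
    simp only [List.foldl_cons]
    rw [ih _ r (by simpa using hr.2), getD_hjStep, if_neg hr.1]

theorem getD_hjFold_mem (i : Int) (sep : String) (L : List (Int × String)) : ∀ (d : PySem.Dict Int String)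
    (r : Int) (v : String), (L.map Prod.fst).Nodup → (r, v) ∈ L →
    (L.foldl (hjStep i sep) d).getD r "" =
      (if i ≠ 0 then d.getD r "" ++ sep else d.getD r "") ++ v := by
  induction L with
  | nil => intro d r v _ hm; simp at hm
  | cons q L ih =>
    intro d r v hnd hm
    simp only [List.map_cons, List.nodup_cons] at hnd
    simp only [List.foldl_cons]
    rcases List.mem_cons.mp hm with he | hm'
    · subst he
      rw [getD_hjFold_notmem i sep L _ r (by simpa using hnd.1), getD_hjStep, if_pos rfl]
    · have hq : q.1 ≠ r := by
        intro he
        exact hnd.1 (he ▸ (List.mem_map.mpr ⟨(r, v), hm', rfl⟩))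
      rw [ih _ r v hnd.2 hm', getD_hjStep]
      rw [if_neg (show ¬ r = q.1 from fun h => hq h.symm)]

theorem map_fst_enumerate (xs : List String) : ∀ (s : Int),
    (PySem.List.enumerate xs s).map Prod.fst = PySem.List.pyRange s (s + xs.length) 1 := by
  induction xs with
  | nil => intro s; simp [PySem.List.enumerate_nil, PySem.List.pyRange_one_eq_nil]
  | cons x xs ih =>
    intro s
    rw [PySem.List.enumerate_cons, PySem.List.pyRange_one_cons (by
      simp only [List.length_cons]; push_cast; omega)]
    simp only [List.map_cons, ih (s+1)]
    congr 2
    simp only [List.length_cons]; push_cast; ring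

theorem mem_enumerate_pyGet (xs : List String) : ∀ (s r : Int), s ≤ r → r < s + xs.length →
    (r, (PySem.List.pyGet? xs (r - s)).getD "") ∈ PySem.List.enumerate xs s := by
  induction xs with
  | nil => intro s r h1 h2; simp at h2; omega
  | cons x xs ih =>
    intro s r h1 h2
    rw [PySem.List.enumerate_cons]
    rcases eq_or_lt_of_le h1 with he | hlt
    · subst he
      simp
    · right
      have hget : PySem.List.pyGet? (x :: xs) (r - s) = PySem.List.pyGet? xs (r - (s+1)) := by
        rw [PySem.List.pyGet?_of_nonneg (x :: xs) (show (0:Int) ≤ r - s by omega),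
          PySem.List.pyGet?_of_nonneg xs (show (0:Int) ≤ r - (s+1) by omega)]
        have h3 : (r - s).toNat = (r - (s+1)).toNat + 1 := by omega
        rw [h3, List.getElem?_cons_succ]
      rw [hget]
      simp only [List.length_cons] at h2
      exact ih (s+1) r (by omega) (by push_cast at h2 ⊢; omega)

def hjBlockL (nd : List String) (h : Int) (pad : String) : List (Int × String) :=
  PySem.List.enumerate nd 0 ++ (PySem.List.pyRange (PySem.List.len nd) h 1).map (fun rb => (rb, pad))

theorem map_fst_hjBlockL (nd : List String) (h : Int) (pad : String) (hle : (nd.length : Int) ≤ h) :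
    (hjBlockL nd h pad).map Prod.fst = PySem.List.pyRange 0 h 1 := by
  unfold hjBlockL
  rw [List.map_append, map_fst_enumerate, List.map_map]
  have : (Prod.fst ∘ fun rb => ((rb : Int), pad)) = id := by funext rb; rfl
  rw [this, List.map_id, PySem.List.len_eq]
  simpa using (PySem.List.pyRange_one_append 0 (nd.length : Int) h (by positivity) hle).symm

theorem mem_hjBlockL (spacing : Int) (nd : List String) (h : Int) (r : Int)
    (h0 : 0 ≤ r) (hr : r < h) :
    (r, hjPiece spacing nd r) ∈ hjBlockL nd h (pvRep (PySem.Str.len ((PySem.List.pyGet? nd 0).getD "")) " ") := by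
  unfold hjBlockL hjPiece
  by_cases hc : r < PySem.List.len nd
  · rw [if_pos hc]
    apply List.mem_append_left
    have := mem_enumerate_pyGet nd 0 r h0 (by rw [PySem.List.len_eq] at hc; omega)
    simpa using this
  · rw [if_neg hc]
    apply List.mem_append_right
    rw [PySem.List.len_eq] at hc ⊢
    exact List.mem_map.mpr ⟨r, PySem.List.mem_pyRange_one.mpr ⟨by omega, hr⟩, rfl⟩

theorem block_eq_hjFold (i spacing : Int) (nd : List String) (h : Int) (d : PySem.Dict Int String) :
    (PySem.List.pyRange (PySem.List.len nd) h 1).foldl (fun d rb =>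
        (if i ≠ 0 then d.modify rb "" (fun s => s ++ pvRep spacing " ") else d).modify rb ""
          (fun s => s ++ pvRep (PySem.Str.len ((PySem.List.pyGet? nd 0).getD "")) " "))
      ((PySem.List.enumerate nd 0).foldl (fun d q =>
        (if i ≠ 0 then d.modify q.1 "" (fun s => s ++ pvRep spacing " ") else d).modify q.1 ""
          (fun s => s ++ q.2)) d)
    = (hjBlockL nd h (pvRep (PySem.Str.len ((PySem.List.pyGet? nd 0).getD "")) " ")).foldl
        (hjStep i (pvRep spacing " ")) d := by
  unfold hjBlockL
  rw [List.foldl_append, List.foldl_map]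
  rfl

theorem getD_block (i spacing : Int) (nd : List String) (h : Int) (d : PySem.Dict Int String)
    (hk : d.keys = PySem.List.pyRange 0 h 1) (hle : (nd.length : Int) ≤ h)
    (r : Int) (h0 : 0 ≤ r) (hr : r < h) :
    ((hjBlockL nd h (pvRep (PySem.Str.len ((PySem.List.pyGet? nd 0).getD "")) " ")).foldl
        (hjStep i (pvRep spacing " ")) d).getD r "" =
      (if i ≠ 0 then d.getD r "" ++ pvRep spacing " " else d.getD r "") ++ hjPiece spacing nd r := by
  apply getD_hjFold_mem
  · rw [map_fst_hjBlockL _ _ _ hle]; exact PySem.List.nodup_pyRange_one 0 h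
  · exact mem_hjBlockL spacing nd h r h0 hr

theorem keys_block (i spacing : Int) (nd : List String) (h : Int) (d : PySem.Dict Int String)
    (hk : d.keys = PySem.List.pyRange 0 h 1) (hle : (nd.length : Int) ≤ h) :
    ((hjBlockL nd h (pvRep (PySem.Str.len ((PySem.List.pyGet? nd 0).getD "")) " ")).foldl
        (hjStep i (pvRep spacing " ")) d).keys = PySem.List.pyRange 0 h 1 := by
  rw [keys_hjFold _ _ _ d, hk]
  intro q hq
  rw [hk, ← map_fst_hjBlockL nd h (pvRep (PySem.Str.len ((PySem.List.pyGet? nd 0).getD "")) " ") hle]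
  exact List.mem_map.mpr ⟨q, hq, rfl⟩

theorem outer_fold (spacing : Int) (h : Int) :
    ∀ (blocks : List (List String)) (i0 : Int) (d : PySem.Dict Int String), 1 ≤ i0 →
    (∀ nd ∈ blocks, (nd.length : Int) ≤ h) → d.keys = PySem.List.pyRange 0 h 1 →
    (let res := (PySem.List.enumerate blocks i0).foldl (fun d p =>
        (hjBlockL p.2 h (pvRep (PySem.Str.len ((PySem.List.pyGet? p.2 0).getD "")) " ")).foldl
          (hjStep p.1 (pvRep spacing " ")) d) d
     res.keys = PySem.List.pyRange 0 h 1 ∧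
     ∀ r : Int, 0 ≤ r → r < h →
       (res.getD r "").toList = (d.getD r "").toList ++
         (blocks.map (fun nd => (pvRep spacing " ").toList ++ (hjPiece spacing nd r).toList)).flatten) := by
  intro blocks
  induction blocks with
  | nil =>
    intro i0 d _ _ hk
    simp [PySem.List.enumerate_nil, hk]
  | cons nd blocks ih =>
    intro i0 d hi0 hle hk
    rw [PySem.List.enumerate_cons]
    simp only [List.foldl_cons]
    have hle0 : (nd.length : Int) ≤ h := hle nd (by simp)
    have hk1 := keys_block i0 spacing nd h d hk hle0
    have := ih (i0 + 1) _ (by omega) (fun x hx => hle x (by simp [hx])) hk1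
    refine ⟨this.1, ?_⟩
    intro r h0 hr
    rw [this.2 r h0 hr, getD_block i0 spacing nd h d hk hle0 r h0 hr,
      if_pos (by omega : i0 ≠ 0)]
    simp

theorem row0_insert_gen (ks : List Int) : ∀ (d : PySem.Dict Int String), ks.Nodup →
    (∀ k ∈ ks, d.contains k = false) →
    (ks.foldl (fun d idx => d.insert idx "") d).keys = d.keys ++ ks ∧
    ∀ r : Int, (ks.foldl (fun d idx => d.insert idx "") d).getD r "" = d.getD r "" := by
  induction ks with
  | nil => intro d _ _; simp
  | cons k ks ih =>
    intro d hnd hc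
    simp only [List.nodup_cons] at hnd
    simp only [List.foldl_cons]
    have hck : d.contains k = false := hc k (by simp)
    have h1 := ih (d.insert k "") hnd.2 (fun x hx => by
      rw [PySem.Dict.contains_insert]
      simp only [Bool.or_eq_false_iff]
      constructor
      · simp only [beq_eq_false_iff_ne, ne_eq]
        intro he; exact hnd.1 (he ▸ hx)
      · exact hc x (by simp [hx]))
    constructor
    · rw [h1.1, PySem.Dict.keys_insert_of_not_contains _ _ hck]
      simp
    · intro r
      rw [h1.2 r]
      by_cases hrk : r = k
      · subst hrk
        rw [PySem.Dict.getD_insert_self]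
        rw [PySem.Dict.contains_eq_isSome_get?] at hck
        cases hg : d.get? r with
        | none => simp [PySem.Dict.getD, hg]
        | some v => rw [hg] at hck; simp at hck
      · rw [PySem.Dict.getD_insert_of_ne d "" "" hrk]

theorem row0_spec (h : Int) :
    ((PySem.List.pyRange 0 h 1).foldl (fun d idx => d.insert idx "") (PySem.Dict.empty : PySem.Dict Int String)).keys
        = PySem.List.pyRange 0 h 1 ∧
    ∀ r : Int, ((PySem.List.pyRange 0 h 1).foldl (fun d idx => d.insert idx "") (PySem.Dict.empty : PySem.Dict Int String)).getD r "" = "" := by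
  have := row0_insert_gen (PySem.List.pyRange 0 h 1) PySem.Dict.empty
    (PySem.List.nodup_pyRange_one 0 h) (fun k _ => PySem.Dict.contains_empty k)
  refine ⟨by rw [this.1]; simp [PySem.Dict.keys_empty], fun r => by rw [this.2 r, PySem.Dict.getD_empty]⟩

theorem join_eq_flatten (sep : List Char) (p : List Char) : ∀ (ps : List (List Char)),
    PySem.Chars.join sep (p :: ps) = p ++ (ps.map (fun q => sep ++ q)).flatten := by
  intro ps
  induction ps generalizing p with
  | nil => simp [PySem.Chars.join_singleton]
  | cons q ps ih =>
    rw [PySem.Chars.join_cons_cons, ih q]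
    simp
theorem main_eq (node_displays : List (List String)) (spacing : Int)
    (hne : node_displays ≠ []) :
    horizontal_join node_displays spacing = horizontal_join_alt node_displays spacing := by
  obtain ⟨m, hm⟩ : ∃ m, PySem.List.max? (node_displays.map (fun nd => PySem.List.len nd)) (fun x => x) = some m := by
    cases hq : PySem.List.max? (node_displays.map (fun nd => PySem.List.len nd)) (fun x => x) with
    | none => exact absurd (by simpa using (PySem.List.max?_eq_none_iff _ _).mp hq) hne
    | some m => exact ⟨m, rfl⟩
  have hmax : ∀ nd ∈ node_displays, (nd.length : Int) ≤ m := by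
    intro nd hnd
    have := PySem.List.max?_isMax hm (PySem.List.len nd) (List.mem_map.mpr ⟨nd, hnd, rfl⟩)
    simpa [PySem.List.len_eq] using this
  have hm0 : 0 ≤ m := by
    have := PySem.List.max?_mem hm
    obtain ⟨nd, _, he⟩ := List.mem_map.mp this
    rw [← he, PySem.List.len_eq]; positivity
  cases node_displays with
  | nil => exact absurd rfl hne
  | cons nd0 rest =>
    simp only [horizontal_join, horizontal_join_alt, hm, Option.getD_some]
    rw [PySem.List.enumerate_cons, List.foldl_cons]
    simp only [zero_add]
    -- fold the port's per-block step into hjFold over hjBlockL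
    have hstep : (fun (d : PySem.Dict Int String) (p : Int × List String) =>
        (PySem.List.pyRange (PySem.List.len p.2) m 1).foldl (fun d rb =>
          (if p.1 ≠ 0 then d.modify rb "" (fun s => s ++ pvRep spacing " ") else d).modify rb ""
            (fun s => s ++ pvRep (PySem.Str.len ((PySem.List.pyGet? p.2 0).getD "")) " "))
          ((PySem.List.enumerate p.2 0).foldl (fun d q =>
            (if p.1 ≠ 0 then d.modify q.1 "" (fun s => s ++ pvRep spacing " ") else d).modify q.1 ""
              (fun s => s ++ q.2)) d))
        = (fun d p => (hjBlockL p.2 m (pvRep (PySem.Str.len ((PySem.List.pyGet? p.2 0).getD "")) " ")).foldl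
            (hjStep p.1 (pvRep spacing " ")) d) := by
      funext d p
      exact block_eq_hjFold p.1 spacing p.2 m d
    rw [hstep, block_eq_hjFold 0 spacing nd0 m]
    have hrow0 := row0_spec m
    have hk1 := keys_block 0 spacing nd0 m _ hrow0.1 (hmax nd0 (by simp))
    have houter := outer_fold spacing m rest 1 _ le_rfl (fun x hx => hmax x (by simp [hx])) hk1
    simp only at houter
    rw [houter.1]
    rw [PySem.List.sorted_eq_of_perm_of_pairwise_lt _ _ _ (List.Perm.refl _)
      (PySem.List.pairwise_lt_pyRange_one 0 m)]
    apply List.map_congr_left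
    intro r hrmem
    obtain ⟨hr0, hrm⟩ := PySem.List.mem_pyRange_one.mp hrmem
    apply String.toList_inj.mp
    rw [houter.2 r hr0 hrm,
      getD_block 0 spacing nd0 m _ hrow0.1 (hmax nd0 (by simp)) r hr0 hrm]
    rw [if_neg (by simp), hrow0.2 r]
    have hB : (PySem.Str.join (pvRep spacing " ")
        ((nd0 :: rest).map (fun nd => hjPiece spacing nd r))).toList
        = (hjPiece spacing nd0 r).toList ++
          (rest.map (fun nd => (pvRep spacing " ").toList ++ (hjPiece spacing nd r).toList)).flatten := by
      rw [PySem.Str.toList_join]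
      simp only [List.map_cons, List.map_map]
      rw [join_eq_flatten]
      congr 1
      rw [List.map_map]
      rfl
    show _ = (PySem.Str.join (pvRep spacing " ")
        ((nd0 :: rest).map (fun nd => hjPiece spacing nd r))).toList
    rw [hB]
    simp [hjPiece]

-- ===== VERDICT (by name: the statement is the Claim_ definition above) =====
theorem horizontal_join_spec : Claim_equal_horizontal_join := by
  intro node_displays spacing _ hpre
  exact main_eq node_displays spacing hpre.1
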